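-- pv_equiv track=rewrite | github.com/boulouk/firedex | firedex-dynamic/firedex-coordinator-service/algorithms/network_flows/network_flow_greedy_split.py | __even_group_split
-- ===== SOURCE A (Python) =====
-- def __even_group_split(subscriber_subscriptions, groups):
--     groups_size = []
--     base_size = subscriber_subscriptions.__len__() // groups
--     surplus = subscriber_subscriptions.__len__() % groups
--
--     for i in range(groups):
--         group_size = base_size
--         if i < surplus:
--             group_size = group_size + 1
--         groups_size.append(group_size)
--
--     grouped_subscriptions = []
--
--     index = 0
--     for i in range(groups):
--         group_size = groups_size[i]
--         grouped_subscriptions.append(subscriber_subscriptions[index:index + group_size])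
--         index = index + group_size
--
--     return grouped_subscriptions
-- ===== SOURCE B (Python) =====
-- def __even_group_split(subscriber_subscriptions, groups):
--     base = len(subscriber_subscriptions) // groups
--     surplus = len(subscriber_subscriptions) % groups
--     grouped_subscriptions = []
--     for i in range(groups):
--         start = i * base + min(i, surplus)
--         end = start + base + (1 if i < surplus else 0)
--         grouped_subscriptions.append(subscriber_subscriptions[start:end])
--     return grouped_subscriptions
-- ===== Notes on version B (the rewrite author's own statement) =====
-- stated objective: simpler
-- what changed: Replaces the precomputed sizes list and the running index accumulator by a single loop that derives each chunk's boundaries in closed form (start = i*base + min(i, surplus)).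
import Mathlib
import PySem

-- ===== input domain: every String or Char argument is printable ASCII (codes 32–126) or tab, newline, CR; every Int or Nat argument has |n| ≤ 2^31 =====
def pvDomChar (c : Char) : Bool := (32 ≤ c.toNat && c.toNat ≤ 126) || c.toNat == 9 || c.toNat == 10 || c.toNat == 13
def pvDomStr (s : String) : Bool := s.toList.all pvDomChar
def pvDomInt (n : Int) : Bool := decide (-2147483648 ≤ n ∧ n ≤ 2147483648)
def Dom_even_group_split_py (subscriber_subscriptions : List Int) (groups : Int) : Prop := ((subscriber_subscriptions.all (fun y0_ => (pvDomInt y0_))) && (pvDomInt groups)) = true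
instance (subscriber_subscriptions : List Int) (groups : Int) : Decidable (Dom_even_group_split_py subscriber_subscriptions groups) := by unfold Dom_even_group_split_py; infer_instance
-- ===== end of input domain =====

-- B derives each chunk's slice boundaries in closed form (start = i*base + min(i,surplus)) in one loop,
-- dropping A's precomputed sizes list and running index accumulator; same cost, simpler.


-- ===== PORT A =====
-- Literal port of A: first loop builds groups_size, second loop walks an index accumulator and slices.
-- groups_size[i] is read with pyGetD (default 0): the index i < groups is always in range, Python never raises there.
def even_group_split_py (subscriber_subscriptions : List Int) (groups : Int) : List (List Int) :=
  let base_size := PySem.Int.floordiv (subscriber_subscriptions.length : Int) groups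
  let surplus := PySem.Int.mod (subscriber_subscriptions.length : Int) groups
  let groups_size := (PySem.List.pyRange 0 groups 1).foldl
    (fun acc i => acc ++ [if i < surplus then base_size + 1 else base_size]) []
  ((PySem.List.pyRange 0 groups 1).foldl
    (fun (st : List (List Int) × Int) i =>
      let group_size := PySem.List.pyGetD groups_size i 0
      (st.1 ++ [PySem.List.slice subscriber_subscriptions (some st.2) (some (st.2 + group_size))],
       st.2 + group_size))
    ([], 0)).1

-- ===== PORT B =====
-- Literal port of B: one loop, chunk boundaries computed in closed form from i.
def even_group_split_py_alt (subscriber_subscriptions : List Int) (groups : Int) : List (List Int) :=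
  let base := PySem.Int.floordiv (subscriber_subscriptions.length : Int) groups
  let surplus := PySem.Int.mod (subscriber_subscriptions.length : Int) groups
  (PySem.List.pyRange 0 groups 1).foldl
    (fun acc i =>
      let start := i * base + min i surplus
      let stop := start + base + (if i < surplus then 1 else 0)
      acc ++ [PySem.List.slice subscriber_subscriptions (some start) (some stop)]) []

-- ===== PRECONDITION & SPEC =====
-- Pre_ excludes only groups = 0, where Python's // and % raise ZeroDivisionError (in both A and B).
def Pre_even_group_split_py (subscriber_subscriptions : List Int) (groups : Int) : Prop := groups ≠ 0
instance (subscriber_subscriptions : List Int) (groups : Int) : Decidable (Pre_even_group_split_py subscriber_subscriptions groups) := by unfold Pre_even_group_split_py; infer_instance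
def pvWitness_even_group_split_py : List Int × Int := ([1, 2, 3, 4, 5], 2)

def Spec_even_group_split_py (subscriber_subscriptions : List Int) (groups : Int) (out : List (List Int)) : Prop := out = even_group_split_py_alt subscriber_subscriptions groups
instance (subscriber_subscriptions : List Int) (groups : Int) (out : List (List Int)) : Decidable (Spec_even_group_split_py subscriber_subscriptions groups out) := by unfold Spec_even_group_split_py; infer_instance

-- ===== CLAIM (what is proved, stated in full; the proofs are below) =====
def Claim_equal_even_group_split_py : Prop := ∀ (subscriber_subscriptions : List Int) (groups : Int), Dom_even_group_split_py subscriber_subscriptions groups → Pre_even_group_split_py subscriber_subscriptions groups → Spec_even_group_split_py subscriber_subscriptions groups (even_group_split_py subscriber_subscriptions groups)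

-- ===== LEMMAS AND PROOFS =====

-- groups_size[i] (read through pyGetD on the mapped range) is the closed-form size of chunk i.
lemma pv_size_at (base surplus g : Int) (k : Nat) (h : (k : Int) < g) :
    PySem.List.pyGetD
      ((PySem.List.pyRange 0 g 1).map (fun j => if j < surplus then base + 1 else base)) (k : Int) 0
    = if (k : Int) < surplus then base + 1 else base := by
  have hk : k < ((PySem.List.pyRange 0 g 1).map
      (fun j => if j < surplus then base + 1 else base)).length := by
    simp [PySem.List.length_pyRange_one]; omega
  rw [PySem.List.pyGetD_natCast, List.getD_eq_getElem _ _ hk]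
  simp [PySem.List.getElem_pyRange_one]

-- Loop invariant: after the first k iterations A's (accumulator, index) equals
-- (B's accumulator, the closed-form index k*base + min k surplus).
lemma pv_loop (s : List Int) (base surplus g : Int) (hsur : 0 ≤ surplus)
    (k : Nat) (hk : (k : Int) ≤ g) :
    (PySem.List.pyRange 0 (k : Int) 1).foldl
      (fun (st : List (List Int) × Int) i =>
        let group_size := PySem.List.pyGetD
          ((PySem.List.pyRange 0 g 1).map (fun j => if j < surplus then base + 1 else base)) i 0
        (st.1 ++ [PySem.List.slice s (some st.2) (some (st.2 + group_size))], st.2 + group_size))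
      ([], 0)
    = ((PySem.List.pyRange 0 (k : Int) 1).foldl
        (fun acc i =>
          let start := i * base + min i surplus
          let stop := start + base + (if i < surplus then 1 else 0)
          acc ++ [PySem.List.slice s (some start) (some stop)]) [],
       (k : Int) * base + min (k : Int) surplus) := by
  induction k with
  | zero =>
    rw [show ((0 : Nat) : Int) = 0 from rfl, PySem.List.pyRange_one_eq_nil le_rfl]
    simp [min_eq_left hsur]
  | succ k ih =>
    have hk' : (k : Int) ≤ g := by push_cast at hk ⊢; omega
    have hlt : (k : Int) < g := by push_cast at hk; omega
    have hsucc : ((k + 1 : Nat) : Int) = (k : Int) + 1 := by push_cast; ring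
    rw [hsucc, PySem.List.pyRange_one_succ_right (by positivity), List.foldl_append,
      List.foldl_append, ih hk']
    simp only [List.foldl_cons, List.foldl_nil, pv_size_at base surplus g k hlt]
    have hstop : (k : Int) * base + min (k : Int) surplus
          + (if (k : Int) < surplus then base + 1 else base)
        = (k : Int) * base + min (k : Int) surplus + base
          + (if (k : Int) < surplus then 1 else 0) := by
      split_ifs <;> ring
    have hkey : (k : Int) * base + min (k : Int) surplus
          + (if (k : Int) < surplus then base + 1 else base)
        = ((k : Int) + 1) * base + min ((k : Int) + 1) surplus := by
      by_cases h : (k : Int) < surplus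
      · rw [min_eq_left (by omega), min_eq_left (by omega), if_pos h]; ring
      · rw [min_eq_right (by omega), min_eq_right (by omega), if_neg h]; ring
    refine Prod.ext ?_ ?_
    · simp only
      rw [hstop]
    · simpa using hkey

-- ===== VERDICT (by name: the statement is the Claim_ definition above) =====
theorem even_group_split_py_spec : Claim_equal_even_group_split_py := by
  intro s g _hdom hg
  unfold Spec_even_group_split_py even_group_split_py even_group_split_py_alt
  simp only []
  by_cases hpos : 0 < g
  · have hsur : 0 ≤ PySem.Int.mod (s.length : Int) g := PySem.Int.mod_nonneg _ hpos
    have hmap : (PySem.List.pyRange 0 g 1).foldl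
        (fun acc i => acc ++ [if i < PySem.Int.mod (s.length : Int) g
          then PySem.Int.floordiv (s.length : Int) g + 1
          else PySem.Int.floordiv (s.length : Int) g]) []
        = (PySem.List.pyRange 0 g 1).map
            (fun j => if j < PySem.Int.mod (s.length : Int) g
              then PySem.Int.floordiv (s.length : Int) g + 1
              else PySem.Int.floordiv (s.length : Int) g) := by
      simpa using PySem.List.foldl_append_singleton_eq_map
        (fun j => if j < PySem.Int.mod (s.length : Int) g
          then PySem.Int.floordiv (s.length : Int) g + 1
          else PySem.Int.floordiv (s.length : Int) g) (PySem.List.pyRange 0 g 1) []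
    rw [hmap]
    have hg' : ((g.toNat : Nat) : Int) = g := Int.toNat_of_nonneg (le_of_lt hpos)
    have := pv_loop s (PySem.Int.floordiv (s.length : Int) g)
      (PySem.Int.mod (s.length : Int) g) g hsur g.toNat (by omega)
    rw [hg'] at this
    rw [this]
  · rw [PySem.List.pyRange_one_eq_nil (by omega)]
    simp
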